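-- pv_equiv track=rewrite | github.com/jang010505/Problem-Solving-Study | programmers/test/2023_KAKAO_BLIND_RECRUITMENT_MAIN_1/4.py | compute
-- ===== SOURCE A (Python) =====
-- def compute(n):
--     s = ""
--     while n:
--         s = str(n % 2) + s
--         n //= 2
--
--     d = [pow(2, n) - 1 for n in range(1, 64)]
--     while True:
--         if len(s) in d:
--             break
--         else:
--             s = '0' + s
--
--     return s
-- ===== SOURCE B (Python) =====
-- def _bits(m):
--     return _bits(m // 2) + str(m % 2) if m else ''
--
--
-- def compute(n):
--     s = _bits(n) if n else '0'
--     k = max(1, len(s).bit_length())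
--     return s.zfill(2 ** k - 1)
-- ===== Notes on version B (the rewrite author's own statement) =====
-- stated objective: simpler
-- what changed: B drops A's precomputed list d and its prepend-one-zero-at-a-time membership loop, computing the padded width in closed form from the bit length of the string's length and applying one zfill; the binary string is built by recursion instead of A's accumulator loop.
import Mathlib
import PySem

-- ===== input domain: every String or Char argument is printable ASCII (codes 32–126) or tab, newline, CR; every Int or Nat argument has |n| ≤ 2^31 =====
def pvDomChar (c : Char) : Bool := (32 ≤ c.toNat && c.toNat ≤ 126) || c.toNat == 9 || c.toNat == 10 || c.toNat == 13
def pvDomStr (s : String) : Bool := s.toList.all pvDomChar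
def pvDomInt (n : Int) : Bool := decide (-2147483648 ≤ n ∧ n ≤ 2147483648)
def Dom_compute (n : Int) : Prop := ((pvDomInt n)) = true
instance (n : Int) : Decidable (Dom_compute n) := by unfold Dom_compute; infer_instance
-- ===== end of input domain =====

-- B replaces A's one-zero-at-a-time padding search through the list d by a closed-form
-- target width 2^max(1, bit_length(len(s))) - 1 and a single zfill (objective: simpler).

-- ===== PORT A =====
-- Python's `while n:` loop prepending str(n % 2); for n < 0 that loop never terminates,
-- so this port stops there (Pre_compute excludes n < 0).
def computeDigits (n : Int) (s : List Char) : List Char :=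
  if h : 0 < n then
    computeDigits (PySem.Int.floordiv n 2) ((PySem.Int.toStr (PySem.Int.mod n 2)).toList ++ s)
  else s
termination_by n.toNat
decreasing_by
  have h2 : PySem.Int.floordiv n 2 = n / 2 := PySem.Int.floordiv_eq_ediv_of_pos (by omega)
  rw [h2]; omega

-- d = [pow(2, n) - 1 for n in range(1, 64)]
def dList : List Int := (PySem.List.pyRange 1 64).map (fun k => 2 ^ k.toNat - 1)

-- `while True: if len(s) in d: break; else: s = '0' + s` — fuel only makes the loop total;
-- 2^63 steps exceed any padding the Python loop performs before finding len(s) in d.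
def padLoop : Nat → List Char → List Char
  | 0, s => s
  | fuel + 1, s => if ((s.length : Int)) ∈ dList then s else padLoop fuel ('0' :: s)

def compute (n : Int) : String := String.mk (padLoop (2 ^ 63) (computeDigits n []))

-- ===== PORT B =====
-- _bits(m) = _bits(m // 2) + str(m % 2) if m else ''  (stops on m ≤ 0; Python diverges for m < 0, outside Pre_)
def bitsB (m : Int) : List Char :=
  if h : 0 < m then
    bitsB (PySem.Int.floordiv m 2) ++ (PySem.Int.toStr (PySem.Int.mod m 2)).toList
  else []
termination_by m.toNat
decreasing_by
  have h2 : PySem.Int.floordiv m 2 = m / 2 := PySem.Int.floordiv_eq_ediv_of_pos (by omega)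
  rw [h2]; omega

def compute_alt (n : Int) : String :=
  let s : List Char := if n ≠ 0 then bitsB n else ['0']
  let k : Nat := max 1 (PySem.Int.bitLength ((s.length : Int)))
  String.mk (PySem.Chars.zfill s ((2 : Int) ^ k - 1))

-- ===== PRECONDITION & SPEC =====
-- Pre_ excludes n < 0, on which Python's A (and B's _bits) loop forever (no return).
def Pre_compute (n : Int) : Prop := 0 ≤ n
instance (n : Int) : Decidable (Pre_compute n) := by unfold Pre_compute; infer_instance
def pvWitness_compute : Int := 6

def Spec_compute (n : Int) (out : String) : Prop := out = compute_alt n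
instance (n : Int) (out : String) : Decidable (Spec_compute n out) := by unfold Spec_compute; infer_instance

-- ===== CLAIM (what is proved, stated in full; the proofs are below) =====
def Claim_equal_compute : Prop := ∀ (n : Int), Dom_compute n → Pre_compute n → Spec_compute n (compute n)

-- ===== LEMMAS AND PROOFS =====

-- the closed-form padding target on lengths
def tgt (L : Nat) : Nat := 2 ^ (max 1 (PySem.Int.bitLength (L : Int))) - 1

theorem digitsEq (n : Int) (s : List Char) : computeDigits n s = bitsB n ++ s := by
  fun_induction computeDigits n s with
  | case1 n s h ih =>
      rw [ih, ← List.append_assoc]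
      conv_rhs => rw [bitsB]
      rw [dif_pos h]
  | case2 n s h =>
      rw [bitsB, dif_neg h, List.nil_append]

theorem digit_len (n : Int) : (PySem.Int.toStr (PySem.Int.mod n 2)).toList = ['0'] ∨
    (PySem.Int.toStr (PySem.Int.mod n 2)).toList = ['1'] := by
  rcases PySem.Int.mod_two_eq n with h | h <;> rw [h] <;> simp [PySem.Int.toList_toStr] <;> decide

theorem bitsB_chars (n : Int) : ∀ c ∈ bitsB n, c = '0' ∨ c = '1' := by
  fun_induction bitsB n with
  | case1 n h ih =>
      intro c hc
      rcases List.mem_append.1 hc with hc | hc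
      · exact ih c hc
      · rcases digit_len n with hd | hd <;> rw [hd] at hc <;> simp at hc <;> simp [hc]
  | case2 n h => intro c hc; simp at hc

theorem bitsB_len_le (j : Nat) : ∀ n : Int, n < 2 ^ j → (bitsB n).length ≤ j := by
  induction j with
  | zero =>
      intro n hn
      rw [bitsB, dif_neg (by omega)]
      simp
  | succ j ih =>
      intro n hn
      by_cases h : 0 < n
      · rw [bitsB, dif_pos h]
        have hfd : PySem.Int.floordiv n 2 = n / 2 := PySem.Int.floordiv_eq_ediv_of_pos (by omega)
        have h2 : (2 : Int) ^ (j + 1) = 2 * 2 ^ j := by ring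
        have hlt : n / 2 < 2 ^ j := by omega
        rw [hfd]
        have := ih (n / 2) hlt
        rcases digit_len n with hd | hd <;> rw [hd] <;> simp <;> omega
      · rw [bitsB, dif_neg h]; simp

-- bitLength is pinned by its two bracketing inequalities
theorem bitLength_le_of_lt {m j : Nat} (h : m < 2 ^ j) : PySem.Int.bitLength (m : Int) ≤ j := by
  by_cases hm : m = 0
  · subst hm; simp [PySem.Int.bitLength_zero]
  · by_contra hgt
    have h1 := PySem.Int.two_pow_bitLength_le (m : Int) (by exact_mod_cast hm)
    have h2 : 2 ^ j ≤ 2 ^ (PySem.Int.bitLength (m : Int) - 1) :=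
      Nat.pow_le_pow_right (by norm_num) (by omega)
    simp only [Int.natAbs_natCast] at h1
    omega

theorem le_of_bitLength_le {m j : Nat} (h : PySem.Int.bitLength (m : Int) ≤ j) : m < 2 ^ j := by
  have h1 := PySem.Int.lt_two_pow_bitLength (m : Int)
  have h2 : (2:Nat) ^ (PySem.Int.bitLength (m : Int)) ≤ 2 ^ j := Nat.pow_le_pow_right (by norm_num) h
  simp only [Int.natAbs_natCast] at h1
  omega

theorem bitLength_pow_sub_one {j : Nat} (hj : 1 ≤ j) :
    PySem.Int.bitLength ((2 ^ j - 1 : Nat) : Int) = j := by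
  have hle : PySem.Int.bitLength ((2 ^ j - 1 : Nat) : Int) ≤ j :=
    bitLength_le_of_lt (by have : 0 < 2 ^ j := Nat.pow_pos (by norm_num); omega)
  by_contra hne
  have hlt : PySem.Int.bitLength ((2 ^ j - 1 : Nat) : Int) ≤ j - 1 := by omega
  have := le_of_bitLength_le hlt
  have h2 : 2 * 2 ^ (j - 1) = 2 ^ j := by
    rw [← pow_succ']; congr 1; omega
  omega

theorem mem_dList_iff (L : Nat) : ((L : Int) ∈ dList) ↔ ∃ j, 1 ≤ j ∧ j ≤ 63 ∧ L = 2 ^ j - 1 := by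
  unfold dList
  rw [List.mem_map]
  constructor
  · rintro ⟨k, hk, he⟩
    rw [PySem.List.mem_pyRange_one] at hk
    refine ⟨k.toNat, by omega, by omega, ?_⟩
    have hpow : (0:Int) < 2 ^ k.toNat := by positivity
    have hpn : ((2 ^ k.toNat : Nat) : Int) = 2 ^ k.toNat := by push_cast; ring
    omega
  · rintro ⟨j, hj1, hj63, he⟩
    refine ⟨(j : Int), ?_, ?_⟩
    · rw [PySem.List.mem_pyRange_one]; omega
    · have : ((j:Int)).toNat = j := by omega
      rw [this]
      have hpn : ((2 ^ j : Nat) : Int) = 2 ^ j := by push_cast; ring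
      have hpos : 0 < 2 ^ j := Nat.pow_pos (by norm_num)
      omega

theorem tgt_ge (L : Nat) : L ≤ tgt L := by
  unfold tgt
  have h1 := PySem.Int.lt_two_pow_bitLength (L : Int)
  simp only [Int.natAbs_natCast] at h1
  have h2 : 2 ^ (PySem.Int.bitLength (L : Int)) ≤ 2 ^ (max 1 (PySem.Int.bitLength (L : Int))) :=
    Nat.pow_le_pow_right (by norm_num) (le_max_right _ _)
  omega

theorem tgt_mem (L : Nat) (h : (L : Int) ∈ dList) : tgt L = L := by
  rcases (mem_dList_iff L).1 h with ⟨j, hj1, _, he⟩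
  subst he
  unfold tgt
  rw [bitLength_pow_sub_one hj1, max_eq_right hj1]

theorem tgt_le (L : Nat) (hL : L ≤ 2 ^ 63 - 1) : tgt L ≤ 2 ^ 63 - 1 := by
  unfold tgt
  have hbl : PySem.Int.bitLength (L : Int) ≤ 63 := bitLength_le_of_lt (by omega)
  have : max 1 (PySem.Int.bitLength (L : Int)) ≤ 63 := by omega
  have := Nat.pow_le_pow_right (show 1 ≤ 2 by norm_num) this
  omega

theorem tgt_not_mem (L : Nat) (hL : L ≤ 2 ^ 63 - 1) (h : ¬ ((L : Int) ∈ dList)) :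
    L < tgt L ∧ tgt (L + 1) = tgt L := by
  have hge := tgt_ge L
  have hne : L ≠ tgt L := by
    intro he
    apply h
    apply (mem_dList_iff L).2
    have hbl : PySem.Int.bitLength (L : Int) ≤ 63 := bitLength_le_of_lt (by omega)
    refine ⟨max 1 (PySem.Int.bitLength (L : Int)), le_max_left _ _, by omega, he⟩
  have hlt : L < tgt L := by omega
  refine ⟨hlt, ?_⟩
  by_cases hL0 : L = 0
  · subst hL0
    unfold tgt
    norm_num [PySem.Int.bitLength_zero]
    decide
  · -- 1 ≤ L < tgt L = 2^(bitLength L) - 1, so bitLength (L+1) = bitLength L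
    have hbl1 : 1 ≤ PySem.Int.bitLength (L : Int) := by
      by_contra hb
      have : PySem.Int.bitLength (L : Int) = 0 := by omega
      have := le_of_bitLength_le (j := 0) (m := L) (by omega)
      simp at this; omega
    have htgt_eq : tgt L = 2 ^ (PySem.Int.bitLength (L : Int)) - 1 := by
      unfold tgt; rw [max_eq_right hbl1]
    have hlt2 : L + 1 < 2 ^ (PySem.Int.bitLength (L : Int)) := by omega
    have hup : PySem.Int.bitLength ((L + 1 : Nat) : Int) ≤ PySem.Int.bitLength (L : Int) :=
      bitLength_le_of_lt hlt2
    have hdn : PySem.Int.bitLength (L : Int) ≤ PySem.Int.bitLength ((L + 1 : Nat) : Int) := by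
      by_contra hb
      have := le_of_bitLength_le (m := L + 1) (j := PySem.Int.bitLength ((L+1 : Nat) : Int))
        (le_refl _)
      have h2 : 2 ^ (PySem.Int.bitLength ((L+1:Nat) : Int)) ≤ 2 ^ (PySem.Int.bitLength (L : Int) - 1) :=
        Nat.pow_le_pow_right (by norm_num) (by omega)
      have h3 := PySem.Int.two_pow_bitLength_le (L : Int) (by exact_mod_cast hL0)
      simp only [Int.natAbs_natCast] at h3
      omega
    have heq : PySem.Int.bitLength ((L + 1 : Nat) : Int) = PySem.Int.bitLength (L : Int) := by omega
    unfold tgt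
    rw [show ((L + 1 : Nat) : Int) = ((L:Int) + 1) by push_cast; ring] at heq
    rw [show ((L + 1 : Nat) : Int) = ((L:Int) + 1) by push_cast; ring, heq]

theorem padLoop_spec (fuel : Nat) : ∀ s : List Char, s.length ≤ 2 ^ 63 - 1 →
    tgt s.length - s.length ≤ fuel →
    padLoop fuel s = List.replicate (tgt s.length - s.length) '0' ++ s := by
  induction fuel with
  | zero =>
      intro s _ hf
      rw [padLoop, Nat.le_zero.1 hf]
      simp
  | succ fuel ih =>
      intro s hL hf
      rw [padLoop]
      by_cases hm : ((s.length : Int)) ∈ dList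
      · rw [if_pos hm, tgt_mem _ hm]
        simp
      · rw [if_neg hm]
        obtain ⟨hlt, hsucc⟩ := tgt_not_mem s.length hL hm
        have htle := tgt_le s.length hL
        have h1 : ('0' :: s).length = s.length + 1 := by simp
        rw [ih ('0' :: s) (by omega) (by rw [h1, hsucc]; omega)]
        rw [h1, hsucc]
        have h2 : tgt s.length - s.length = (tgt s.length - (s.length + 1)) + 1 := by omega
        rw [h2, List.replicate_succ']
        simp

theorem zfill_digits (cs : List Char) (h : ∀ c ∈ cs, c = '0' ∨ c = '1') (w : Int) :
    PySem.Chars.zfill cs w = List.replicate (w.toNat - cs.length) '0' ++ cs := by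
  rw [PySem.Chars.zfill.eq_def]
  by_cases hw : w ≤ (cs.length : Int)
  · rw [if_pos hw]
    have : w.toNat - cs.length = 0 := by omega
    rw [this]; simp
  · rw [if_neg hw]
    match cs, h with
    | [], _ => simp
    | c :: rest, h =>
        have hc := h c (by simp)
        have : ¬ (c = '+' ∨ c = '-') := by rcases hc with h | h <;> subst h <;> decide
        simp [this]

-- length of A's digit string is at most 63 on the domain, and tgt bounds give fuel enough
theorem main_pos (n : Int) (hd : n ≤ 2147483648) (hn : 0 < n) : compute n = compute_alt n := by
  unfold compute compute_alt
  have hne : n ≠ 0 := by omega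
  simp only [hne, ne_eq, not_false_eq_true, if_true, digitsEq, List.append_nil]
  set s := bitsB n with hs
  have hlen : s.length ≤ 63 := by
    apply bitsB_len_le 63 n
    have : (2:Int) ^ 63 = 9223372036854775808 := by norm_num
    omega
  have hL : s.length ≤ 2 ^ 63 - 1 := by omega
  rw [padLoop_spec (2 ^ 63) s hL (by have := tgt_le s.length hL; omega)]
  rw [zfill_digits s (bitsB_chars n)]
  congr 2
  unfold tgt
  set k := max 1 (PySem.Int.bitLength ((s.length : Int))) with hk
  have hpn : ((2:Int) ^ k) = ((2 ^ k : Nat) : Int) := by push_cast; ring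
  rw [hpn]
  have hpos : 0 < 2 ^ k := Nat.pow_pos (by norm_num)
  congr 1
  omega

theorem main_zero : compute 0 = compute_alt 0 := by
  have h0 : computeDigits 0 [] = [] := by rw [computeDigits]; simp
  unfold compute compute_alt
  rw [h0]
  norm_num
  congr 1

-- ===== VERDICT (by name: the statement is the Claim_ definition above) =====
theorem compute_spec : Claim_equal_compute := by
  intro n hdom hpre
  unfold Spec_compute
  unfold Dom_compute pvDomInt at hdom
  have hdd : -2147483648 ≤ n ∧ n ≤ 2147483648 := by exact_mod_cast of_decide_eq_true hdom
  unfold Pre_compute at hpre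
  by_cases h0 : n = 0
  · subst h0; exact main_zero
  · exact main_pos n hdd.2 (by omega)
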